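-- pv_equiv track=rewrite | github.com/Timiocoisin/AxiomFlow | axiomflow-api/app/services/context_aware_translation.py | group_consecutive_blocks
-- ===== SOURCE A (Python) =====
-- from typing import Any
--
-- def group_consecutive_blocks(
--     blocks: list[dict[str, Any]],
--     max_group_size: int = 3,
--     max_group_length: int = 1000,
-- ) -> list[list[int]]:
--     """
--     将连续的相似块分组，以便联合翻译
--
--     Args:
--         blocks: 文本块列表
--         max_group_size: 最大组大小（块数量）
--         max_group_length: 最大组长度（字符数）
--
--     Returns:
--         分组索引列表，每个组是一个索引列表
--     """
--     groups: list[list[int]] = []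
--     current_group: list[int] = []
--     current_length = 0
--
--     for i, block in enumerate(blocks):
--         text = block.get("text", "").strip()
--         if not text:
--             continue
--
--         block_type = block.get("type", "paragraph")
--
--         # 标题和特殊块不与其他块合并
--         if block_type in ("heading", "title", "caption", "formula"):
--             # 先保存当前组
--             if current_group:
--                 groups.append(current_group)
--                 current_group = []
--                 current_length = 0
--             # 标题单独成组（可选）
--             continue
--
--         # 检查是否可以添加到当前组
--         text_length = len(text)
--         can_add = (
--             len(current_group) < max_group_size
--             and current_length + text_length <= max_group_length
--         )
--
--         if can_add and current_group:
--             # 添加到当前组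
--             current_group.append(i)
--             current_length += text_length
--         else:
--             # 开始新组
--             if current_group:
--                 groups.append(current_group)
--             current_group = [i]
--             current_length = text_length
--
--     # 添加最后一组
--     if current_group:
--         groups.append(current_group)
--
--     return groups
-- ===== SOURCE B (Python) =====
-- def _pack(segment, max_group_size, max_group_length):
--     """Greedily pack one separator-free segment of (index, text_length) pairs."""
--     out = []
--     cur = []
--     cur_len = 0
--     for i, n in segment:
--         if cur and len(cur) < max_group_size and cur_len + n <= max_group_length:
--             cur.append(i)
--             cur_len += n
--         else:
--             if cur:
--                 out.append(cur)
--             cur = [i]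
--             cur_len = n
--     if cur:
--         out.append(cur)
--     return out
--
--
-- def group_consecutive_blocks(blocks, max_group_size=3, max_group_length=1000):
--     # Pass 1: split the usable blocks into segments separated by special-type blocks.
--     segments = [[]]
--     for i, block in enumerate(blocks):
--         text = block.get("text", "").strip()
--         if not text:
--             continue
--         if block.get("type", "paragraph") in ("heading", "title", "caption", "formula"):
--             if segments[-1]:
--                 segments.append([])
--         else:
--             segments[-1].append((i, len(text)))
--     # Pass 2: pack each segment independently.
--     groups = []
--     for segment in segments:
--         groups.extend(_pack(segment, max_group_size, max_group_length))
--     return groups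
-- ===== Notes on version B (the rewrite author's own statement) =====
-- stated objective: alternative
-- what changed: A interleaves separator handling and greedy packing in one stateful loop; B first splits the non-empty blocks into separator-free segments (special-type blocks act only as boundaries), then greedily packs each segment independently and concatenates the per-segment groups.
import Mathlib
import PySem

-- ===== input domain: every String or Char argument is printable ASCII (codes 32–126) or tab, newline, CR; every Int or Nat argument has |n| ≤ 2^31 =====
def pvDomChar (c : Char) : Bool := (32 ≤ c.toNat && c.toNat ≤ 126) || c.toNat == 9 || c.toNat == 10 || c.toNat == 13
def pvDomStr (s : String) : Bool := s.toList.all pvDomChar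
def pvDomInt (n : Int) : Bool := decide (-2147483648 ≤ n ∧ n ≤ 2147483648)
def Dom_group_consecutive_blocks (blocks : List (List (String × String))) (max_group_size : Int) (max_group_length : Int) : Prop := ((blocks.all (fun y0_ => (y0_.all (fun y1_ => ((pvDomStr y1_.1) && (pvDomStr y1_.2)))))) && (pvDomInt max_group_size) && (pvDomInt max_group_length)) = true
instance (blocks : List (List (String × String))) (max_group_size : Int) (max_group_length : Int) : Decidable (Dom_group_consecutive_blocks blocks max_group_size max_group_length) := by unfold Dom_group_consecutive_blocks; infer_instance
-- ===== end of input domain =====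

-- B replaces A's single stateful loop by a two-pass decomposition (segmentation, then
-- per-segment greedy packing); same asymptotic cost, objective: alternative structure.

-- ===== PORT A =====
-- block.get(key, default) on a dict given as an association list
def pvGetStr (block : List (String × String)) (k dflt : String) : String :=
  PySem.Dict.getD (PySem.Dict.mk block) k dflt

-- A's single loop over enumerate(blocks) with state (groups, current_group, current_length)
def pvALoop (ms ml : Int) (L : List (Int × List (String × String)))
    (groups : List (List Int)) (cur : List Int) (clen : Int) : List (List Int) :=
  match L with
  | [] => if cur = [] then groups else groups ++ [cur]
  | (i, block) :: rest =>
    let text := PySem.Str.strip (pvGetStr block "text" "")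
    if text = "" then pvALoop ms ml rest groups cur clen
    else
      let btype := pvGetStr block "type" "paragraph"
      if btype = "heading" ∨ btype = "title" ∨ btype = "caption" ∨ btype = "formula" then
        if cur = [] then pvALoop ms ml rest groups cur clen
        else pvALoop ms ml rest (groups ++ [cur]) [] 0
      else
        let n := PySem.Str.len text
        let can_add := (cur.length : Int) < ms ∧ clen + n ≤ ml
        if can_add ∧ cur ≠ [] then pvALoop ms ml rest groups (cur ++ [i]) (clen + n)
        else pvALoop ms ml rest (if cur = [] then groups else groups ++ [cur]) [i] n

def group_consecutive_blocks (blocks : List (List (String × String))) (max_group_size : Int) (max_group_length : Int) : List (List Int) :=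
  pvALoop max_group_size max_group_length (PySem.List.enumerate blocks) [] [] 0

-- ===== PORT B =====
-- pass 1: split the usable blocks into separator-free segments of (index, text_length)
def pvSegs (L : List (Int × List (String × String))) (curseg : List (Int × Int)) : List (List (Int × Int)) :=
  match L with
  | [] => [curseg]
  | (i, block) :: rest =>
    let text := PySem.Str.strip (pvGetStr block "text" "")
    if text = "" then pvSegs rest curseg
    else
      let btype := pvGetStr block "type" "paragraph"
      if btype = "heading" ∨ btype = "title" ∨ btype = "caption" ∨ btype = "formula" then
        if curseg = [] then pvSegs rest curseg else curseg :: pvSegs rest []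
      else pvSegs rest (curseg ++ [(i, PySem.Str.len text)])

-- pass 2: greedy packing of one segment (Source B's _pack)
def pvPack (ms ml : Int) (seg : List (Int × Int))
    (out : List (List Int)) (cur : List Int) (clen : Int) : List (List Int) :=
  match seg with
  | [] => if cur = [] then out else out ++ [cur]
  | (i, n) :: rest =>
    if cur ≠ [] ∧ (cur.length : Int) < ms ∧ clen + n ≤ ml then
      pvPack ms ml rest out (cur ++ [i]) (clen + n)
    else pvPack ms ml rest (if cur = [] then out else out ++ [cur]) [i] n

def group_consecutive_blocks_alt (blocks : List (List (String × String))) (max_group_size : Int) (max_group_length : Int) : List (List Int) :=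
  (pvSegs (PySem.List.enumerate blocks) []).foldl
    (fun g seg => g ++ pvPack max_group_size max_group_length seg [] [] 0) []

-- ===== PRECONDITION & SPEC =====
def Spec_group_consecutive_blocks (blocks : List (List (String × String))) (max_group_size : Int) (max_group_length : Int) (out : List (List Int)) : Prop := out = group_consecutive_blocks_alt blocks max_group_size max_group_length
instance (blocks : List (List (String × String))) (max_group_size : Int) (max_group_length : Int) (out : List (List Int)) : Decidable (Spec_group_consecutive_blocks blocks max_group_size max_group_length out) := by unfold Spec_group_consecutive_blocks; infer_instance

-- ===== CLAIM (what is proved, stated in full; the proofs are below) =====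
def Claim_equal_group_consecutive_blocks : Prop := ∀ (blocks : List (List (String × String))) (max_group_size : Int) (max_group_length : Int), Dom_group_consecutive_blocks blocks max_group_size max_group_length → Spec_group_consecutive_blocks blocks max_group_size max_group_length (group_consecutive_blocks blocks max_group_size max_group_length)

-- ===== LEMMAS AND PROOFS =====

-- packing of one segment as a fold over a 3-part state, for the coupling invariant
def pvStep (ms ml : Int) (st : List (List Int) × List Int × Int) (p : Int × Int) :
    List (List Int) × List Int × Int :=
  if st.2.1 ≠ [] ∧ (st.2.1.length : Int) < ms ∧ st.2.2 + p.2 ≤ ml then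
    (st.1, st.2.1 ++ [p.1], st.2.2 + p.2)
  else ((if st.2.1 = [] then st.1 else st.1 ++ [st.2.1]), [p.1], p.2)

def pvSt (ms ml : Int) (c : List (Int × Int)) : List (List Int) × List Int × Int :=
  c.foldl (pvStep ms ml) ([], [], 0)

theorem pvPack_eq_fold (ms ml : Int) (seg : List (Int × Int)) :
    ∀ (out : List (List Int)) (cur : List Int) (clen : Int),
    pvPack ms ml seg out cur clen =
      (if (List.foldl (pvStep ms ml) (out, cur, clen) seg).2.1 = []
       then (List.foldl (pvStep ms ml) (out, cur, clen) seg).1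
       else (List.foldl (pvStep ms ml) (out, cur, clen) seg).1 ++
            [(List.foldl (pvStep ms ml) (out, cur, clen) seg).2.1]) := by
  induction seg with
  | nil => intro out cur clen; rfl
  | cons p rest ih =>
    intro out cur clen
    obtain ⟨i, n⟩ := p
    simp only [pvPack, List.foldl_cons]
    by_cases h : cur ≠ [] ∧ (cur.length : Int) < ms ∧ clen + n ≤ ml
    · have hstep : pvStep ms ml (out, cur, clen) (i, n) = (out, cur ++ [i], clen + n) := by
        unfold pvStep; rw [if_pos h]
      rw [if_pos h, ih, hstep]
    · have hstep : pvStep ms ml (out, cur, clen) (i, n) =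
          ((if cur = [] then out else out ++ [cur]), [i], n) := by
        unfold pvStep; rw [if_neg h]
      rw [if_neg h, ih, hstep]

theorem pvStep_cur_ne (ms ml : Int) (st : List (List Int) × List Int × Int) (p : Int × Int) :
    (pvStep ms ml st p).2.1 ≠ [] := by
  unfold pvStep
  split_ifs <;> simp

theorem pvFoldl_cur_ne (ms ml : Int) (c : List (Int × Int)) :
    ∀ st : List (List Int) × List Int × Int, st.2.1 ≠ [] →
      (List.foldl (pvStep ms ml) st c).2.1 ≠ [] := by
  induction c with
  | nil => intro st h; exact h
  | cons x c' ih =>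
    intro st _
    rw [List.foldl_cons]
    exact ih _ (pvStep_cur_ne ms ml st x)

theorem pvSt_cur_ne (ms ml : Int) (c : List (Int × Int)) (h : c ≠ []) :
    (pvSt ms ml c).2.1 ≠ [] := by
  cases c with
  | nil => exact absurd rfl h
  | cons x c' =>
    unfold pvSt
    rw [List.foldl_cons]
    exact pvFoldl_cur_ne ms ml c' _ (pvStep_cur_ne ms ml _ x)

-- the coupling invariant: A's loop, started from the pack state of the current segment c,
-- computes the segments from c onward, each packed independently
theorem pvMain (ms ml : Int) (L : List (Int × List (String × String))) :
    ∀ (c : List (Int × Int)) (out : List (List Int)),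
    pvALoop ms ml L (out ++ (pvSt ms ml c).1) (pvSt ms ml c).2.1 (pvSt ms ml c).2.2 =
      out ++ (pvSegs L c).flatMap (fun seg => pvPack ms ml seg [] [] 0) := by
  induction L with
  | nil =>
    intro c out
    simp only [pvALoop, pvSegs, List.flatMap_cons, List.flatMap_nil, List.append_nil]
    rw [pvPack_eq_fold]
    have hps : List.foldl (pvStep ms ml) ([], [], 0) c = pvSt ms ml c := rfl
    rw [hps]
    split_ifs with h <;> simp
  | cons p rest ih =>
    intro c out
    obtain ⟨i, block⟩ := p
    simp only [pvALoop, pvSegs]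
    by_cases ht : PySem.Str.strip (pvGetStr block "text" "") = ""
    · rw [if_pos ht, if_pos ht]; exact ih c out
    · rw [if_neg ht, if_neg ht]
      by_cases hs : pvGetStr block "type" "paragraph" = "heading" ∨
          pvGetStr block "type" "paragraph" = "title" ∨
          pvGetStr block "type" "paragraph" = "caption" ∨
          pvGetStr block "type" "paragraph" = "formula"
      · rw [if_pos hs, if_pos hs]
        by_cases hc : c = []
        · subst hc
          have e1 : (pvSt ms ml ([] : List (Int × Int))).2.1 = [] := rfl
          rw [if_pos e1]
          exact ih [] out
        · have hcur := pvSt_cur_ne ms ml c hc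
          rw [if_neg hcur, if_neg hc]
          have e0 : pvSt ms ml ([] : List (Int × Int)) = ([], [], 0) := rfl
          have h3 := ih [] (out ++ (pvSt ms ml c).1 ++ [(pvSt ms ml c).2.1])
          rw [e0] at h3
          simp only [List.append_nil] at h3
          rw [h3]
          simp only [List.flatMap_cons]
          have hps : List.foldl (pvStep ms ml) ([], [], 0) c = pvSt ms ml c := rfl
          rw [pvPack_eq_fold, hps, if_neg hcur]
          simp [List.append_assoc]
      · rw [if_neg hs, if_neg hs]
        have hps : List.foldl (pvStep ms ml) ([], [], 0) c = pvSt ms ml c := rfl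
        set n := PySem.Str.len (PySem.Str.strip (pvGetStr block "text" "")) with hn
        by_cases h1 : (pvSt ms ml c).2.1 = []
        · -- current group empty: both open the new group [i] with length n
          have hstep : pvSt ms ml (c ++ [(i, n)]) = ((pvSt ms ml c).1, [i], n) := by
            unfold pvSt
            rw [List.foldl_append, List.foldl_cons, List.foldl_nil, hps]
            unfold pvStep
            rw [if_neg (fun hh => hh.1 h1), if_pos h1]
          rw [if_neg (fun hcontra => hcontra.2 h1), if_pos h1]
          have h3 := ih (c ++ [(i, n)]) out
          rw [hstep] at h3
          exact h3
        · by_cases h2 : ((pvSt ms ml c).2.1.length : Int) < ms ∧ (pvSt ms ml c).2.2 + n ≤ ml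
          · -- fits: the block joins the current group
            have hstep : pvSt ms ml (c ++ [(i, n)]) =
                ((pvSt ms ml c).1, (pvSt ms ml c).2.1 ++ [i], (pvSt ms ml c).2.2 + n) := by
              unfold pvSt
              rw [List.foldl_append, List.foldl_cons, List.foldl_nil, hps]
              unfold pvStep
              rw [if_pos (⟨h1, h2.1, h2.2⟩ : _ ∧ _ ∧ _)]
            rw [if_pos ⟨h2, h1⟩]
            have h3 := ih (c ++ [(i, n)]) out
            rw [hstep] at h3
            exact h3
          · -- does not fit: close the current group, open [i]
            have hstep : pvSt ms ml (c ++ [(i, n)]) =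
                ((pvSt ms ml c).1 ++ [(pvSt ms ml c).2.1], [i], n) := by
              unfold pvSt
              rw [List.foldl_append, List.foldl_cons, List.foldl_nil, hps]
              unfold pvStep
              rw [if_neg (fun hh => h2 ⟨hh.2.1, hh.2.2⟩), if_neg h1]
            rw [if_neg (fun hcontra => h2 hcontra.1), if_neg h1]
            have h3 := ih (c ++ [(i, n)]) out
            rw [hstep] at h3
            rw [← List.append_assoc] at h3
            exact h3

theorem pvFoldl_append_flatMap (f : List (Int × Int) → List (List Int))
    (ss : List (List (Int × Int))) :
    ∀ (g : List (List Int)), ss.foldl (fun g seg => g ++ f seg) g = g ++ ss.flatMap f := by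
  induction ss with
  | nil => intro g; simp
  | cons s ss ih => intro g; simp [ih, List.append_assoc]

-- ===== VERDICT (by name: the statement is the Claim_ definition above) =====
theorem group_consecutive_blocks_spec : Claim_equal_group_consecutive_blocks := by
  intro blocks ms ml _
  show group_consecutive_blocks blocks ms ml = group_consecutive_blocks_alt blocks ms ml
  unfold group_consecutive_blocks group_consecutive_blocks_alt
  rw [pvFoldl_append_flatMap]
  have h := pvMain ms ml (PySem.List.enumerate blocks) [] []
  simpa [pvSt] using h
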